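-- pv_equiv track=rewrite | github.com/ajeseung/Coding_test_practice | 프로그래머스/2/388353. 지게차와 크레인/지게차와 크레인.py | solution
-- ===== SOURCE A (Python) =====
-- from collections import deque
--
-- def solution(storage, requests):
--     n = len(storage)
--     m = len(storage[0])
--     grid = [list(row) for row in storage]
--     EMPTY = '.'
--     dirs = [(1,0), (-1,0), (0,1), (0,-1)]
--
--     def outside_empty_bfs():
--         """바깥(경계)과 연결된 '빈 칸'을 BFS로 표시해서 visited 반환"""
--         visited = [[False]*m for _ in range(n)]
--         q = deque()
--
--         # 경계의 빈 칸들에서 시작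
--         for i in range(n):
--             for j in (0, m-1):
--                 if grid[i][j] == EMPTY and not visited[i][j]:
--                     visited[i][j] = True
--                     q.append((i, j))
--         for j in range(m):
--             for i in (0, n-1):
--                 if grid[i][j] == EMPTY and not visited[i][j]:
--                     visited[i][j] = True
--                     q.append((i, j))
--
--         # 빈 칸끼리만 확장
--         while q:
--             x, y = q.popleft()
--             for dx, dy in dirs:
--                 nx, ny = x + dx, y + dy
--                 if 0 <= nx < n and 0 <= ny < m:
--                     if not visited[nx][ny] and grid[nx][ny] == EMPTY:
--                         visited[nx][ny] = True
--                         q.append((nx, ny))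
--         return visited
--
--     for req in requests:
--         ch = req[0]
--
--         # 크레인: 해당 알파벳 전부 제거
--         if len(req) == 2:
--             for i in range(n):
--                 for j in range(m):
--                     if grid[i][j] == ch:
--                         grid[i][j] = EMPTY
--             continue
--
--         # 지게차: "요청 시점" 접근 가능한 ch만 제거
--         outside = outside_empty_bfs()
--         to_remove = []
--
--         for i in range(n):
--             for j in range(m):
--                 if grid[i][j] != ch:
--                     continue
--
--                 # 경계면은 무조건 접근 가능
--                 if i == 0 or i == n-1 or j == 0 or j == m-1:
--                     to_remove.append((i, j))
--                     continue
--
--                 # 바깥과 연결된 빈 칸에 인접하면 접근 가능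
--                 accessible = False
--                 for dx, dy in dirs:
--                     ni, nj = i + dx, j + dy
--                     if grid[ni][nj] == EMPTY and outside[ni][nj]:
--                         accessible = True
--                         break
--                 if accessible:
--                     to_remove.append((i, j))
--
--         # 동시 제거(연쇄 제거 방지)
--         for i, j in to_remove:
--             grid[i][j] = EMPTY
--
--     # 남은 컨테이너 수
--     return sum(1 for i in range(n) for j in range(m) if grid[i][j] != EMPTY)
-- ===== SOURCE B (Python) =====
-- def solution(storage, requests):
--     # Same result as the BFS version, but outside-connected empty cells are found by
--     # iterated dense saturation of a set (bounded fixed-point iteration), not a queue BFS.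
--     # Works on a rectangular copy truncated to the width of the first row.
--     n = len(storage)
--     m = len(storage[0])
--     grid = [list(row[:m]) for row in storage]
--
--     def inb(i, j):
--         return 0 <= i < n and 0 <= j < m
--
--     def nbrs(i, j):
--         return [(i + 1, j), (i - 1, j), (i, j + 1), (i, j - 1)]
--
--     def boundary(i, j):
--         return i == 0 or i == n - 1 or j == 0 or j == m - 1
--
--     def outside_reach():
--         vis = {(i, j) for i in range(n) for j in range(m)
--                if grid[i][j] == '.' and boundary(i, j)}
--         for _ in range(n * m):
--             new = {(a, b) for (i, j) in vis for (a, b) in nbrs(i, j)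
--                    if inb(a, b) and grid[a][b] == '.'} - vis
--             if not new:
--                 break
--             vis = vis | new
--         return vis
--
--     for req in requests:
--         ch = req[0]
--         if len(req) == 2:
--             grid = [['.' if c == ch else c for c in row] for row in grid]
--         else:
--             out = outside_reach()
--             rem = [(i, j) for i in range(n) for j in range(m)
--                    if grid[i][j] == ch and
--                    (boundary(i, j) or any(p in out for p in nbrs(i, j)))]
--             for i, j in rem:
--                 grid[i][j] = '.'
--     return sum(c != '.' for row in grid for c in row)
-- ===== Notes on version B (the rewrite author's own statement) =====
-- stated objective: alternative
-- what changed: The forklift's outside-connected empty region is computed by bounded fixed-point saturation of a cell set (repeatedly adding empty neighbours of the set, at most n*m rounds) instead of an explicit deque BFS with a visited matrix, crane removal and the final count become per-row comprehensions/sums instead of index-range scans, and removable cells are collected by one filter over all cells.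
import Mathlib
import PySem

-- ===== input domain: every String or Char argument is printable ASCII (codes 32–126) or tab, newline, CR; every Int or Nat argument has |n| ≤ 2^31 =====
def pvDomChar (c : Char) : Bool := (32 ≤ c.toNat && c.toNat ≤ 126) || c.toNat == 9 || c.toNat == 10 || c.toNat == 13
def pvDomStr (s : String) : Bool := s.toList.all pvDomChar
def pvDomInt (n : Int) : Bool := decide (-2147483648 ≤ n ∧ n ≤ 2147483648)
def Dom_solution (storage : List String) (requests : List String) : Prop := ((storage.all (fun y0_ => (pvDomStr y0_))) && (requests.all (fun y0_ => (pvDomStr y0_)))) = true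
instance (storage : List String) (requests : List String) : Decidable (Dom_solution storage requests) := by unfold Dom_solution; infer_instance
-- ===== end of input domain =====

-- B replaces A's queue BFS over outside-connected empty cells by a bounded fixed-point
-- saturation of a set, and A's per-cell rescans by filters over the cell list (objective: alternative).
-- In both ports the Python 2-D char grid (resp. bool matrix / cell set) is represented by its
-- lookup function (resp. the list of its cells): every access the Python code performs is in
-- range on the admitted inputs, so the representation is exact.

-- shared basic helpers (both Pythons compute these the same way)
def pvInR (n m i j : Int) : Bool := decide (0 ≤ i) && decide (i < n) && decide (0 ≤ j) && decide (j < m)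

def pvCells (n m : Int) : List (Int × Int) :=
  (PySem.List.pyRange 0 n 1).flatMap (fun i => (PySem.List.pyRange 0 m 1).map (fun j => (i, j)))

def pvUnvis (n m : Int) (vis : List (Int × Int)) : Nat :=
  ((pvCells n m).filter (fun c => !vis.contains c)).length

def pvUpd (g : Int → Int → Char) (c : Int × Int) : Int → Int → Char :=
  fun i j => if i = c.1 ∧ j = c.2 then '.' else g i j

-- the Pythons store the grid as a concrete list of lists after every request;
-- pvTab materialises a lookup function into that table and pvLook reads it back
def pvTab (n m : Int) (g : Int → Int → Char) : List (List Char) :=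
  (PySem.List.pyRange 0 n 1).map (fun i => (PySem.List.pyRange 0 m 1).map (fun j => g i j))

def pvLook (rows : List (List Char)) : Int → Int → Char :=
  fun i j => ((rows.getD i.toNat []).getD j.toNat '?')

theorem mem_pvCells {n m : Int} {c : Int × Int} :
    c ∈ pvCells n m ↔ pvInR n m c.1 c.2 = true := by
  obtain ⟨i, j⟩ := c
  simp [pvCells, List.mem_flatMap, PySem.List.mem_pyRange_one, pvInR, and_assoc]

theorem pvUnvis_filter (n m : Int) (nc : Int × Int) (vis : List (Int × Int)) :
    ((pvCells n m).filter (fun c => !(nc :: vis).contains c)) =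
      ((pvCells n m).filter (fun c => !vis.contains c)).filter (fun c => !(c == nc)) := by
  rw [List.filter_filter]
  apply List.filter_congr
  intro c _
  by_cases h : c = nc <;> simp [h]

theorem pvUnvis_cons_lt {n m : Int} {nc : Int × Int} {vis : List (Int × Int)}
    (h1 : pvInR n m nc.1 nc.2 = true) (h2 : ¬ vis.contains nc) :
    pvUnvis n m (nc :: vis) < pvUnvis n m vis := by
  unfold pvUnvis
  rw [pvUnvis_filter]
  apply List.length_filter_lt_length_iff_exists.mpr
  refine ⟨nc, ?_, by simp⟩
  simp only [List.mem_filter]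
  exact ⟨mem_pvCells.mpr h1, by simpa using h2⟩

-- ===== PORT A =====
def pvGridA (storage : List String) : Int → Int → Char :=
  fun i j => (((storage.map String.toList).getD i.toNat []).getD j.toNat '?')

def pvDirsA : List (Int × Int) := [(1, 0), (-1, 0), (0, 1), (0, -1)]

-- one test of A's boundary seeding loops: mark visited and enqueue if empty and unvisited
def pvSeed (g : Int → Int → Char) (vq : List (Int × Int) × List (Int × Int)) (c : Int × Int) :
    List (Int × Int) × List (Int × Int) :=
  if g c.1 c.2 = '.' ∧ ¬ vq.1.contains c then (c :: vq.1, vq.2 ++ [c]) else vq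

def pvSeedsA (g : Int → Int → Char) (n m : Int) : List (Int × Int) × List (Int × Int) :=
  let s1 := (PySem.List.pyRange 0 n 1).foldl
    (fun vq i => [(0 : Int), m - 1].foldl (fun vq j => pvSeed g vq (i, j)) vq) ([], [])
  (PySem.List.pyRange 0 m 1).foldl
    (fun vq j => [(0 : Int), n - 1].foldl (fun vq i => pvSeed g vq (i, j)) vq) s1

-- the body of A's BFS inner `for dx, dy in dirs` loop
def pvPush (g : Int → Int → Char) (n m : Int) (c : Int × Int)
    (p : List (Int × Int) × List (Int × Int)) (d : Int × Int) :
    List (Int × Int) × List (Int × Int) :=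
  if pvInR n m (c.1 + d.1) (c.2 + d.2) = true ∧ ¬ p.1.contains (c.1 + d.1, c.2 + d.2) ∧
      g (c.1 + d.1) (c.2 + d.2) = '.' then
    ((c.1 + d.1, c.2 + d.2) :: p.1, p.2 ++ [(c.1 + d.1, c.2 + d.2)])
  else p

theorem pvPush_measure (g : Int → Int → Char) (n m : Int) (c : Int × Int)
    (p : List (Int × Int) × List (Int × Int)) (d : Int × Int) :
    (pvPush g n m c p d).2.length + pvUnvis n m (pvPush g n m c p d).1 ≤
      p.2.length + pvUnvis n m p.1 := by
  unfold pvPush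
  split_ifs with h
  · obtain ⟨h1, h2, h3⟩ := h
    have := pvUnvis_cons_lt (nc := (c.1 + d.1, c.2 + d.2)) (vis := p.1) h1 h2
    simp only [List.length_append, List.length_cons, List.length_nil]
    omega
  · exact le_rfl

theorem pvFold_measure (g : Int → Int → Char) (n m : Int) (c : Int × Int)
    (p : List (Int × Int) × List (Int × Int)) (l : List (Int × Int)) :
    (l.foldl (pvPush g n m c) p).2.length + pvUnvis n m (l.foldl (pvPush g n m c) p).1 ≤
      p.2.length + pvUnvis n m p.1 := by
  induction l generalizing p with
  | nil => exact le_rfl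
  | cons d l ih => exact (ih _).trans (pvPush_measure g n m c p d)

-- A's `while q:` loop (queue + the set of cells of the visited bool matrix)
def pvBfsLoop (g : Int → Int → Char) (n m : Int) (q vis : List (Int × Int)) : List (Int × Int) :=
  match q with
  | [] => vis
  | c :: rest =>
    let p := pvDirsA.foldl (pvPush g n m c) (vis, rest)
    pvBfsLoop g n m p.2 p.1
termination_by q.length + pvUnvis n m vis
decreasing_by
  have h := pvFold_measure g n m c (vis, rest) pvDirsA
  calc (List.foldl (pvPush g n m c) (vis, rest) pvDirsA).2.length +
      pvUnvis n m (List.foldl (pvPush g n m c) (vis, rest) pvDirsA).1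
      ≤ rest.length + pvUnvis n m vis := h
    _ < rest.length + 1 + pvUnvis n m vis := by omega

def pvOutsideA (g : Int → Int → Char) (n m : Int) : List (Int × Int) :=
  let s := pvSeedsA g n m
  pvBfsLoop g n m s.2 s.1

-- A's per-cell accessibility test (the `for dx, dy in dirs: … break` flag loop)
def pvAccessible (g : Int → Int → Char) (out : List (Int × Int)) (i j : Int) : Bool :=
  pvDirsA.any (fun d => decide (g (i + d.1) (j + d.2) = '.') && out.contains (i + d.1, j + d.2))

def pvToRemove (g : Int → Int → Char) (n m : Int) (ch : Char) (out : List (Int × Int)) :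
    List (Int × Int) :=
  (PySem.List.pyRange 0 n 1).foldl (fun acc i =>
    (PySem.List.pyRange 0 m 1).foldl (fun acc j =>
      if g i j ≠ ch then acc
      else if i = 0 ∨ i = n - 1 ∨ j = 0 ∨ j = m - 1 then acc ++ [(i, j)]
      else if pvAccessible g out i j = true then acc ++ [(i, j)] else acc) acc) []

def pvStepFnA (n m : Int) (g : Int → Int → Char) (req : String) : Int → Int → Char :=
  let ch := req.toList.headD '?'
  if req.toList.length = 2 then
    (PySem.List.pyRange 0 n 1).foldl (fun g i =>
      (PySem.List.pyRange 0 m 1).foldl (fun g j =>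
        if g i j = ch then pvUpd g (i, j) else g) g) g
  else
    let out := pvOutsideA g n m
    (pvToRemove g n m ch out).foldl pvUpd g

-- one request applied to the materialised grid (Python mutates / rebuilds the list of lists)
def pvStepA (n m : Int) (rows : List (List Char)) (req : String) : List (List Char) :=
  pvTab n m (pvStepFnA n m (pvLook rows) req)

def solution (storage : List String) (requests : List String) : Int :=
  let n : Int := storage.length
  let m : Int := ((storage.headD "").toList).length
  let g := pvLook (requests.foldl (pvStepA n m) (pvTab n m (pvGridA storage)))
  (PySem.List.pyRange 0 n 1).foldl (fun acc i =>
    (PySem.List.pyRange 0 m 1).foldl (fun acc j =>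
      if g i j ≠ '.' then acc + 1 else acc) acc) 0

-- ===== PORT B =====
def pvGridB (storage : List String) (m : Int) : Int → Int → Char :=
  fun i j => ((storage.map (fun r => r.toList.take m.toNat)).getD i.toNat []).getD j.toNat '?'

def pvNbrs (c : Int × Int) : List (Int × Int) :=
  [(c.1 + 1, c.2), (c.1 - 1, c.2), (c.1, c.2 + 1), (c.1, c.2 - 1)]

def pvBoundary (n m i j : Int) : Bool :=
  decide (i = 0) || decide (i = n - 1) || decide (j = 0) || decide (j = m - 1)

def pvSeedsB (g : Int → Int → Char) (n m : Int) : List (Int × Int) :=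
  (pvCells n m).filter (fun c => decide (g c.1 c.2 = '.') && pvBoundary n m c.1 c.2)

-- one saturation round: vis ∪ {in-range empty neighbours of vis}
def pvExpand (g : Int → Int → Char) (n m : Int) (vis : List (Int × Int)) : List (Int × Int) :=
  vis.foldl (fun acc c =>
    (pvNbrs c).foldl (fun acc nc =>
      if pvInR n m nc.1 nc.2 = true ∧ g nc.1 nc.2 = '.' ∧ ¬ acc.contains nc
      then acc ++ [nc] else acc) acc) vis

-- B's saturation loop: at most n*m rounds, stopping as soon as a round adds nothing
-- (pvExpand only appends, so 'no new cells' is exactly 'the length did not grow')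
def pvSatB (g : Int → Int → Char) (n m : Int) : Nat → List (Int × Int) → List (Int × Int)
  | 0, vis => vis
  | Nat.succ k, vis =>
    let v' := pvExpand g n m vis
    if v'.length = vis.length then vis else pvSatB g n m k v'

def pvOutsideB (g : Int → Int → Char) (n m : Int) : List (Int × Int) :=
  pvSatB g n m (n * m).toNat (pvSeedsB g n m)

def pvStepFnB (n m : Int) (g : Int → Int → Char) (req : String) : Int → Int → Char :=
  let ch := req.toList.headD '?'
  if req.toList.length = 2 then
    fun i j => if g i j = ch then '.' else g i j
  else
    let out := pvOutsideB g n m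
    let rem := (pvCells n m).filter (fun c =>
      decide (g c.1 c.2 = ch) &&
        (pvBoundary n m c.1 c.2 || (pvNbrs c).any (fun p => out.contains p)))
    rem.foldl pvUpd g

def pvStepB (n m : Int) (rows : List (List Char)) (req : String) : List (List Char) :=
  pvTab n m (pvStepFnB n m (pvLook rows) req)

def solution_alt (storage : List String) (requests : List String) : Int :=
  let n : Int := storage.length
  let m : Int := ((storage.headD "").toList).length
  let g := pvLook (requests.foldl (pvStepB n m) (pvTab n m (pvGridB storage m)))
  ((pvCells n m).countP (fun c => decide (g c.1 c.2 ≠ '.')) : Int)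

-- ===== PRECONDITION & SPEC =====
-- Pre_ excludes exactly the inputs where the Python A raises (IndexError): empty storage
-- (storage[0]), a row shorter than the first row (the full-grid scans index past it), an
-- empty request string (req[0]), and a forklift request on a zero-width grid (seeding
-- indexes grid[i][0] into an empty row).
def Pre_solution (storage : List String) (requests : List String) : Prop :=
  storage ≠ [] ∧
  (∀ r ∈ storage, ((storage.headD "").toList).length ≤ r.toList.length) ∧
  (∀ q ∈ requests, 1 ≤ q.toList.length) ∧
  (((storage.headD "").toList).length = 0 → ∀ q ∈ requests, q.toList.length = 2)
instance (storage : List String) (requests : List String) : Decidable (Pre_solution storage requests) := by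
  unfold Pre_solution; infer_instance

def pvWitness_solution : List String × List String := (["AB.", "..A", "BAA"], ["A", "BB", "B"])

def Spec_solution (storage : List String) (requests : List String) (out : Int) : Prop := out = solution_alt storage requests
instance (storage : List String) (requests : List String) (out : Int) : Decidable (Spec_solution storage requests out) := by unfold Spec_solution; infer_instance

-- ===== CLAIM (what is proved, stated in full; the proofs are below) =====
def Claim_equal_solution : Prop := ∀ (storage : List String) (requests : List String), Dom_solution storage requests → Pre_solution storage requests → Spec_solution storage requests (solution storage requests)

-- ===== LEMMAS AND PROOFS =====

-- grids agreeing on every in-range cell (the only cells either Python ever reads)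
def pvGEq (n m : Int) (g g' : Int → Int → Char) : Prop :=
  ∀ i j : Int, pvInR n m i j = true → g i j = g' i j

-- the empty cells connected to the outside: the common characterisation of
-- A's BFS result and B's saturation result
inductive pvReach (g : Int → Int → Char) (n m : Int) : Int × Int → Prop
  | seed (i j : Int) : pvInR n m i j = true → pvBoundary n m i j = true → g i j = '.' →
      pvReach g n m (i, j)
  | step (c : Int × Int) (i j : Int) : pvReach g n m c → (i, j) ∈ pvNbrs c →
      pvInR n m i j = true → g i j = '.' → pvReach g n m (i, j)

theorem pvReach_inR {g : Int → Int → Char} {n m : Int} {c : Int × Int}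
    (h : pvReach g n m c) : pvInR n m c.1 c.2 = true ∧ g c.1 c.2 = '.' := by
  cases h with
  | seed i j h1 h2 h3 => exact ⟨h1, h3⟩
  | step c i j h1 h2 h3 h4 => exact ⟨h3, h4⟩

theorem mem_pvNbrs {x y : Int × Int} :
    y ∈ pvNbrs x ↔ ∃ d ∈ pvDirsA, y = (x.1 + d.1, x.2 + d.2) := by
  simp [pvNbrs, pvDirsA, sub_eq_add_neg]

theorem pvReach_congr {g g' : Int → Int → Char} {n m : Int} (h : pvGEq n m g g')
    {c : Int × Int} (hr : pvReach g n m c) : pvReach g' n m c := by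
  induction hr with
  | seed i j h1 h2 h3 => exact pvReach.seed i j h1 h2 ((h i j h1).symm.trans h3)
  | step c i j h1 h2 h3 h4 ih => exact pvReach.step c i j ih h2 h3 ((h i j h3).symm.trans h4)

-- ---- A's BFS computes pvReach ----

theorem pvPushFold_spec (g : Int → Int → Char) (n m : Int) (c : Int × Int)
    (l : List (Int × Int)) (p : List (Int × Int) × List (Int × Int)) :
    (∀ x ∈ p.1, x ∈ (l.foldl (pvPush g n m c) p).1) ∧
    (∀ x ∈ p.2, x ∈ (l.foldl (pvPush g n m c) p).2) ∧
    (∀ x ∈ (l.foldl (pvPush g n m c) p).1, x ∈ p.1 ∨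
      (x ∈ (l.foldl (pvPush g n m c) p).2 ∧ ∃ d ∈ l, x = (c.1 + d.1, c.2 + d.2) ∧
        pvInR n m x.1 x.2 = true ∧ g x.1 x.2 = '.')) ∧
    (∀ x ∈ (l.foldl (pvPush g n m c) p).2, x ∈ p.2 ∨ x ∈ (l.foldl (pvPush g n m c) p).1) ∧
    (∀ d ∈ l, pvInR n m (c.1 + d.1) (c.2 + d.2) = true → g (c.1 + d.1) (c.2 + d.2) = '.' →
      (c.1 + d.1, c.2 + d.2) ∈ (l.foldl (pvPush g n m c) p).1) := by
  induction l generalizing p with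
  | nil =>
    exact ⟨fun x hx => hx, fun x hx => hx, fun x hx => Or.inl hx, fun x hx => Or.inl hx,
      fun d hd => absurd hd (by simp)⟩
  | cons d l ih =>
    have s1 : ∀ x ∈ p.1, x ∈ (pvPush g n m c p d).1 := by
      intro x hx; unfold pvPush; split_ifs
      · exact List.mem_cons_of_mem _ hx
      · exact hx
    have s2 : ∀ x ∈ p.2, x ∈ (pvPush g n m c p d).2 := by
      intro x hx; unfold pvPush; split_ifs
      · exact List.mem_append_left _ hx
      · exact hx
    have s3 : ∀ x ∈ (pvPush g n m c p d).1, x ∈ p.1 ∨ (x ∈ (pvPush g n m c p d).2 ∧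
        x = (c.1 + d.1, c.2 + d.2) ∧ pvInR n m x.1 x.2 = true ∧ g x.1 x.2 = '.') := by
      intro x hx; unfold pvPush at hx ⊢; split_ifs at hx ⊢ with h
      · rcases List.mem_cons.mp hx with rfl | hx
        · exact Or.inr ⟨List.mem_append_right _ (by simp), rfl, h.1, h.2.2⟩
        · exact Or.inl hx
      · exact Or.inl hx
    have s4 : ∀ x ∈ (pvPush g n m c p d).2, x ∈ p.2 ∨ x ∈ (pvPush g n m c p d).1 := by
      intro x hx; unfold pvPush at hx ⊢; split_ifs at hx ⊢ with h
      · rcases List.mem_append.mp hx with hx | hx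
        · exact Or.inl hx
        · exact Or.inr (List.mem_cons.mpr (Or.inl (by simpa using hx)))
      · exact Or.inl hx
    have s5 : pvInR n m (c.1 + d.1) (c.2 + d.2) = true → g (c.1 + d.1) (c.2 + d.2) = '.' →
        (c.1 + d.1, c.2 + d.2) ∈ (pvPush g n m c p d).1 := by
      intro h1 h2; unfold pvPush; split_ifs with h
      · exact List.mem_cons_self
      · by_contra hmem
        exact h ⟨h1, by simpa using (show (c.1+d.1, c.2+d.2) ∉ p.1 from hmem), h2⟩
    obtain ⟨i1, i2, i3, i4, i5⟩ := ih (pvPush g n m c p d)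
    refine ⟨fun x hx => i1 x (s1 x hx), fun x hx => i2 x (s2 x hx), ?_, ?_, ?_⟩
    · intro x hx
      rcases i3 x hx with hx' | ⟨hq, d', hd', hrest⟩
      · rcases s3 x hx' with hx'' | ⟨hq, heq, h1, h2⟩
        · exact Or.inl hx''
        · exact Or.inr ⟨i2 x hq, d, List.mem_cons_self, heq, h1, h2⟩
      · exact Or.inr ⟨hq, d', List.mem_cons_of_mem _ hd', hrest⟩
    · intro x hx
      rcases i4 x hx with hx' | hx'
      · rcases s4 x hx' with hx'' | hx''
        · exact Or.inl hx''
        · exact Or.inr (i1 x hx'')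
      · exact Or.inr hx'
    · intro d' hd' h1 h2
      rcases List.mem_cons.mp hd' with rfl | hd'
      · exact i1 _ (s5 h1 h2)
      · exact i5 d' hd' h1 h2

def pvInvariant (g : Int → Int → Char) (n m : Int) (q vis : List (Int × Int)) : Prop :=
  (∀ x ∈ vis, pvReach g n m x) ∧ (∀ x ∈ q, x ∈ vis) ∧
  (∀ x ∈ vis, x ∉ q → ∀ nc ∈ pvNbrs x, pvInR n m nc.1 nc.2 = true → g nc.1 nc.2 = '.' →
    nc ∈ vis)

theorem pvBfsLoop_mono (g : Int → Int → Char) (n m : Int) (q vis : List (Int × Int)) :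
    ∀ x ∈ vis, x ∈ pvBfsLoop g n m q vis := by
  induction q, vis using pvBfsLoop.induct g n m with
  | case1 vis => intro x hx; simpa [pvBfsLoop] using hx
  | case2 vis c rest p ih =>
    intro x hx
    rw [pvBfsLoop]
    exact ih x ((pvPushFold_spec g n m c pvDirsA (vis, rest)).1 x hx)

theorem pvBfsLoop_inv (g : Int → Int → Char) (n m : Int) (q vis : List (Int × Int))
    (h : pvInvariant g n m q vis) : pvInvariant g n m [] (pvBfsLoop g n m q vis) := by
  revert h
  induction q, vis using pvBfsLoop.induct g n m with
  | case1 vis =>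
    intro h
    rw [pvBfsLoop]
    exact h
  | case2 vis c rest p ih =>
    intro h
    obtain ⟨hsound, hq, hclosed⟩ := h
    rw [pvBfsLoop]
    apply ih
    obtain ⟨f1, f2, f3, f4, f5⟩ := pvPushFold_spec g n m c pvDirsA (vis, rest)
    refine ⟨?_, ?_, ?_⟩
    · intro x hx
      rcases f3 x hx with hx' | ⟨hq2, d, hd, heq, h1, h2⟩
      · exact hsound x hx'
      · have hc : pvReach g n m c := hsound c (hq c List.mem_cons_self)
        rw [heq] at h1 h2 ⊢
        exact pvReach.step c _ _ hc (mem_pvNbrs.mpr ⟨d, hd, rfl⟩) h1 h2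
    · intro x hx
      rcases f4 x hx with hx' | hx'
      · exact f1 x (hq x (List.mem_cons_of_mem _ hx'))
      · exact hx'
    · intro x hx hnq nc hnc h1 h2
      rcases f3 x hx with hx' | ⟨hq2, _, _, _, _, _⟩
      · by_cases hxc : x = c
        · subst hxc
          rcases mem_pvNbrs.mp hnc with ⟨d, hd, rfl⟩
          exact f5 d hd h1 h2
        · have hxq : x ∉ c :: rest := by
            intro hxm
            rcases List.mem_cons.mp hxm with rfl | hr
            · exact hxc rfl
            · exact hnq (f2 x hr)
          exact f1 nc (hclosed x hx' hxq nc hnc h1 h2)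
      · exact absurd hq2 hnq

theorem pvSeedFold_spec (g : Int → Int → Char) (L : List (Int × Int))
    (p : List (Int × Int) × List (Int × Int)) (hp : ∀ x, x ∈ p.1 ↔ x ∈ p.2) :
    (∀ x, x ∈ (L.foldl (pvSeed g) p).1 ↔ x ∈ p.1 ∨ (x ∈ L ∧ g x.1 x.2 = '.')) ∧
    (∀ x, x ∈ (L.foldl (pvSeed g) p).1 ↔ x ∈ (L.foldl (pvSeed g) p).2) := by
  induction L generalizing p with
  | nil => exact ⟨fun x => by simp, fun x => by simpa using hp x⟩
  | cons c L ih =>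
    have hstep1 : ∀ x, x ∈ (pvSeed g p c).1 ↔ x ∈ p.1 ∨ (x = c ∧ g c.1 c.2 = '.') := by
      intro x
      unfold pvSeed
      split_ifs with h
      · simp only [List.mem_cons]
        constructor
        · rintro (rfl | hx)
          · exact Or.inr ⟨rfl, h.1⟩
          · exact Or.inl hx
        · rintro (hx | ⟨rfl, _⟩)
          · exact Or.inr hx
          · exact Or.inl rfl
      · constructor
        · exact fun hx => Or.inl hx
        · rintro (hx | ⟨rfl, hdot⟩)
          · exact hx
          · rcases not_and.mp h hdot with h'
            exact by simpa using not_not.mp h'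
    have hstep2 : ∀ x, x ∈ (pvSeed g p c).1 ↔ x ∈ (pvSeed g p c).2 := by
      intro x
      unfold pvSeed
      split_ifs with h
      · simp only [List.mem_cons, List.mem_append, List.mem_singleton]
        rw [hp x]
        tauto
      · exact hp x
    obtain ⟨ih1, ih2⟩ := ih (pvSeed g p c) hstep2
    refine ⟨fun x => ?_, ih2⟩
    rw [List.foldl_cons, ih1 x, hstep1 x]
    simp only [List.mem_cons]
    constructor
    · rintro ((hx | ⟨rfl, hdot⟩) | ⟨hxL, hdot⟩)
      · exact Or.inl hx
      · exact Or.inr ⟨Or.inl rfl, hdot⟩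
      · exact Or.inr ⟨Or.inr hxL, hdot⟩
    · rintro (hx | ⟨(rfl | hxL), hdot⟩)
      · exact Or.inl (Or.inl hx)
      · exact Or.inl (Or.inr ⟨rfl, hdot⟩)
      · exact Or.inr ⟨hxL, hdot⟩

-- the flattened candidate list of A's two seeding loop nests
def pvCands (n m : Int) : List (Int × Int) :=
  (PySem.List.pyRange 0 n 1).flatMap (fun i => [(i, (0 : Int)), (i, m - 1)]) ++
  (PySem.List.pyRange 0 m 1).flatMap (fun j => [((0 : Int), j), (n - 1, j)])

theorem pvSeedsA_eq (g : Int → Int → Char) (n m : Int) :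
    pvSeedsA g n m = (pvCands n m).foldl (pvSeed g) ([], []) := by
  rw [pvSeedsA, pvCands, List.foldl_append, List.foldl_flatMap, List.foldl_flatMap]
  rfl

theorem pvBoundary_iff {n m i j : Int} :
    pvBoundary n m i j = true ↔ (i = 0 ∨ i = n - 1 ∨ j = 0 ∨ j = m - 1) := by
  simp only [pvBoundary, Bool.or_eq_true, decide_eq_true_eq]
  tauto

theorem pvInR_iff {n m i j : Int} :
    pvInR n m i j = true ↔ (0 ≤ i ∧ i < n ∧ 0 ≤ j ∧ j < m) := by
  simp [pvInR, and_assoc]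

theorem mem_pvCands {n m : Int} {x : Int × Int} (hn : 1 ≤ n) (hm : 1 ≤ m) :
    x ∈ pvCands n m ↔ pvInR n m x.1 x.2 = true ∧ pvBoundary n m x.1 x.2 = true := by
  obtain ⟨a, b⟩ := x
  rw [pvInR_iff, pvBoundary_iff]
  simp only [pvCands, List.mem_append, List.mem_flatMap, PySem.List.mem_pyRange_one,
    List.mem_cons, List.not_mem_nil, or_false, Prod.mk.injEq]
  constructor
  · rintro (⟨i, hi, (⟨rfl, rfl⟩ | ⟨rfl, rfl⟩)⟩ | ⟨j, hj, (⟨rfl, rfl⟩ | ⟨rfl, rfl⟩)⟩) <;>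
      refine ⟨⟨?_, ?_, ?_, ?_⟩, ?_⟩ <;> omega
  · rintro ⟨⟨h1, h2, h3, h4⟩, (h5 | h5 | h5 | h5)⟩
    · exact Or.inr ⟨b, ⟨h3, h4⟩, Or.inl ⟨h5, rfl⟩⟩
    · exact Or.inr ⟨b, ⟨h3, h4⟩, Or.inr ⟨h5, rfl⟩⟩
    · exact Or.inl ⟨a, ⟨h1, h2⟩, Or.inl ⟨rfl, h5⟩⟩
    · exact Or.inl ⟨a, ⟨h1, h2⟩, Or.inr ⟨rfl, h5⟩⟩

theorem pvOutsideA_iff (g : Int → Int → Char) (n m : Int) (hn : 1 ≤ n) (hm : 1 ≤ m)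
    (x : Int × Int) : x ∈ pvOutsideA g n m ↔ pvReach g n m x := by
  have hseed := pvSeedFold_spec g (pvCands n m) ([], []) (fun y => by simp)
  simp only [pvOutsideA]
  rw [pvSeedsA_eq]
  have hv : ∀ y, y ∈ ((pvCands n m).foldl (pvSeed g) ([], [])).1 ↔
      (y ∈ pvCands n m ∧ g y.1 y.2 = '.') := fun y => by simpa using hseed.1 y
  have hvq := hseed.2
  have hinv0 : pvInvariant g n m ((pvCands n m).foldl (pvSeed g) ([], [])).2
      ((pvCands n m).foldl (pvSeed g) ([], [])).1 := by
    refine ⟨?_, ?_, ?_⟩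
    · intro y hy
      obtain ⟨hc, hdot⟩ := (hv y).mp hy
      obtain ⟨hin, hb⟩ := (mem_pvCands hn hm).mp hc
      have := pvReach.seed y.1 y.2 hin hb hdot
      simpa using this
    · intro y hy
      exact (hvq y).mpr hy
    · intro y hy hnq
      exact absurd ((hvq y).mp hy) hnq
  have hinv := pvBfsLoop_inv g n m _ _ hinv0
  constructor
  · exact fun hx => hinv.1 x hx
  · intro hr
    induction hr with
    | seed i j h1 h2 h3 =>
      apply pvBfsLoop_mono
      exact (hv (i, j)).mpr ⟨(mem_pvCands hn hm).mpr ⟨h1, h2⟩, h3⟩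
    | step c i j h1 h2 h3 h4 ih =>
      exact hinv.2.2 c ih (by simp) (i, j) h2 h3 h4

-- ---- B's saturation computes pvReach ----

theorem pvExpand_mem (g : Int → Int → Char) (n m : Int) (vis : List (Int × Int))
    (x : Int × Int) :
    x ∈ pvExpand g n m vis ↔ x ∈ vis ∨
      ∃ c ∈ vis, x ∈ pvNbrs c ∧ pvInR n m x.1 x.2 = true ∧ g x.1 x.2 = '.' := by
  have inner : ∀ (l acc : List (Int × Int)),
      x ∈ l.foldl (fun acc nc =>
        if pvInR n m nc.1 nc.2 = true ∧ g nc.1 nc.2 = '.' ∧ ¬ acc.contains nc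
        then acc ++ [nc] else acc) acc ↔
      x ∈ acc ∨ (x ∈ l ∧ pvInR n m x.1 x.2 = true ∧ g x.1 x.2 = '.') := by
    intro l
    induction l with
    | nil => intro acc; simp
    | cons nc l ih =>
      intro acc
      simp only [List.foldl_cons]
      split_ifs with hcond
      · rw [ih]
        simp only [List.mem_append, List.mem_cons, List.not_mem_nil, or_false]
        constructor
        · rintro ((hx | rfl) | ⟨hx, h1, h2⟩)
          · exact Or.inl hx
          · exact Or.inr ⟨Or.inl rfl, hcond.1, hcond.2.1⟩
          · exact Or.inr ⟨Or.inr hx, h1, h2⟩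
        · rintro (hx | ⟨(rfl | hx), h1, h2⟩)
          · exact Or.inl (Or.inl hx)
          · exact Or.inl (Or.inr rfl)
          · exact Or.inr ⟨hx, h1, h2⟩
      · rw [ih]
        simp only [List.mem_cons]
        constructor
        · rintro (hx | ⟨hx, h1, h2⟩)
          · exact Or.inl hx
          · exact Or.inr ⟨Or.inr hx, h1, h2⟩
        · rintro (hx | ⟨(rfl | hx), h1, h2⟩)
          · exact Or.inl hx
          · -- the guard failed though x is in range and empty: x was already in acc
            rcases not_and.mp hcond h1 with h
            rcases not_and.mp h h2 with h'
            exact Or.inl (by simpa using not_not.mp h')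
          · exact Or.inr ⟨hx, h1, h2⟩
  have outer : ∀ (L acc : List (Int × Int)),
      x ∈ L.foldl (fun acc c =>
        (pvNbrs c).foldl (fun acc nc =>
          if pvInR n m nc.1 nc.2 = true ∧ g nc.1 nc.2 = '.' ∧ ¬ acc.contains nc
          then acc ++ [nc] else acc) acc) acc ↔
      x ∈ acc ∨ ∃ c ∈ L, x ∈ pvNbrs c ∧ pvInR n m x.1 x.2 = true ∧ g x.1 x.2 = '.' := by
    intro L
    induction L with
    | nil => intro acc; simp
    | cons c L ih =>
      intro acc
      simp only [List.foldl_cons]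
      rw [ih, inner]
      simp only [List.mem_cons]
      constructor
      · rintro ((hx | ⟨hnb, h1, h2⟩) | ⟨c', hc', hnb, h1, h2⟩)
        · exact Or.inl hx
        · exact Or.inr ⟨c, Or.inl rfl, hnb, h1, h2⟩
        · exact Or.inr ⟨c', Or.inr hc', hnb, h1, h2⟩
      · rintro (hx | ⟨c', (rfl | hc'), hnb, h1, h2⟩)
        · exact Or.inl (Or.inl hx)
        · exact Or.inl (Or.inr ⟨hnb, h1, h2⟩)
        · exact Or.inr ⟨c', hc', hnb, h1, h2⟩
  exact outer vis vis

theorem pvFoldAppend_prefix {α β : Type} (f : List α → β → List α)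
    (hf : ∀ a x, ∃ t, f a x = a ++ t) (l : List β) (acc : List α) :
    ∃ t, l.foldl f acc = acc ++ t := by
  induction l generalizing acc with
  | nil => exact ⟨[], by simp⟩
  | cons x l ih =>
    obtain ⟨t1, ht1⟩ := hf acc x
    obtain ⟨t2, ht2⟩ := ih (f acc x)
    refine ⟨t1 ++ t2, ?_⟩
    rw [List.foldl_cons, ht2, ht1, List.append_assoc]

theorem pvExpand_prefix (g : Int → Int → Char) (n m : Int) (vis : List (Int × Int)) :
    ∃ t, pvExpand g n m vis = vis ++ t := by
  apply pvFoldAppend_prefix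
  intro a c
  apply pvFoldAppend_prefix
  intro a' nc
  split_ifs with h
  · exact ⟨[nc], rfl⟩
  · exact ⟨[], by simp⟩

theorem pvExpand_nodup (g : Int → Int → Char) (n m : Int) (vis : List (Int × Int))
    (h : vis.Nodup) : (pvExpand g n m vis).Nodup := by
  have inner : ∀ (l acc : List (Int × Int)), acc.Nodup →
      (l.foldl (fun acc nc =>
        if pvInR n m nc.1 nc.2 = true ∧ g nc.1 nc.2 = '.' ∧ ¬ acc.contains nc
        then acc ++ [nc] else acc) acc).Nodup := by
    intro l
    induction l with
    | nil => intro acc h; exact h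
    | cons nc l ih =>
      intro acc hacc
      simp only [List.foldl_cons]
      split_ifs with hcond
      · refine ih _ ?_
        have hnc : nc ∉ acc := by simpa using hcond.2.2
        rw [List.nodup_append]
        refine ⟨hacc, List.nodup_singleton _, ?_⟩
        intro a hab b hb
        rw [List.mem_singleton] at hb
        subst hb
        exact fun he => hnc (he ▸ hab)
      · exact ih _ hacc
  have outer : ∀ (L acc : List (Int × Int)), acc.Nodup →
      (L.foldl (fun acc c =>
        (pvNbrs c).foldl (fun acc nc =>
          if pvInR n m nc.1 nc.2 = true ∧ g nc.1 nc.2 = '.' ∧ ¬ acc.contains nc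
          then acc ++ [nc] else acc) acc) acc).Nodup := by
    intro L
    induction L with
    | nil => intro acc h; exact h
    | cons c L ih => intro acc hacc; exact ih _ (inner _ _ hacc)
  exact outer vis vis h

theorem nodup_pvCells (n m : Int) : (pvCells n m).Nodup := by
  rw [pvCells, List.nodup_flatMap]
  refine ⟨fun i _ => ?_, ?_⟩
  · exact (PySem.List.nodup_pyRange_one _ _).map (fun a b h => by simpa using h)
  · apply List.Pairwise.imp ?_ (PySem.List.pairwise_lt_pyRange_one 0 n)
    intro i i' hlt x hx hx'
    simp only [List.mem_map] at hx hx'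
    obtain ⟨j, _, rfl⟩ := hx
    obtain ⟨j', _, he⟩ := hx'
    have : i' = i := congrArg Prod.fst he
    omega

theorem length_pvCells (n m : Int) : (pvCells n m).length = n.toNat * m.toNat := by
  rw [pvCells, List.length_flatMap]
  simp [PySem.List.length_pyRange_one]

theorem pvExpand_subset (g : Int → Int → Char) (n m : Int) (vis : List (Int × Int))
    (hsub : ∀ x ∈ vis, x ∈ pvCells n m) :
    ∀ x ∈ pvExpand g n m vis, x ∈ pvCells n m := by
  intro x hx
  rcases (pvExpand_mem g n m vis x).mp hx with hx | ⟨c, _, _, h1, _⟩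
  · exact hsub x hx
  · exact mem_pvCells.mpr h1

theorem pvExpand_len_eq (g : Int → Int → Char) (n m : Int) (vis : List (Int × Int))
    (h : (pvExpand g n m vis).length = vis.length) : pvExpand g n m vis = vis := by
  obtain ⟨t, ht⟩ := pvExpand_prefix g n m vis
  rw [ht, List.length_append] at h
  have ht0 : t = [] := by
    cases t with
    | nil => rfl
    | cons a t => simp at h
  rw [ht, ht0, List.append_nil]

theorem pvSatB_sound (g : Int → Int → Char) (n m : Int) :
    ∀ (k : Nat) (vis : List (Int × Int)), (∀ y ∈ vis, pvReach g n m y) →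
      ∀ y ∈ pvSatB g n m k vis, pvReach g n m y := by
  intro k
  induction k with
  | zero => exact fun vis h => h
  | succ k ih =>
    intro vis h
    simp only [pvSatB]
    split_ifs with hl
    · exact h
    · apply ih
      intro y hy
      rcases (pvExpand_mem g n m vis y).mp hy with hy | ⟨c, hc, hnb, h1, h2⟩
      · exact h y hy
      · have := pvReach.step c y.1 y.2 (h c hc) (by simpa using hnb) h1 h2
        simpa using this

theorem pvSatB_mono (g : Int → Int → Char) (n m : Int) :
    ∀ (k : Nat) (vis : List (Int × Int)), ∀ x ∈ vis, x ∈ pvSatB g n m k vis := by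
  intro k
  induction k with
  | zero => exact fun vis x hx => hx
  | succ k ih =>
    intro vis x hx
    simp only [pvSatB]
    split_ifs with hl
    · exact hx
    · apply ih
      obtain ⟨t, ht⟩ := pvExpand_prefix g n m vis
      rw [ht]
      exact List.mem_append_left _ hx

theorem pvSatB_fix (g : Int → Int → Char) (n m : Int) :
    ∀ (k : Nat) (vis : List (Int × Int)), (∀ x ∈ vis, x ∈ pvCells n m) → vis.Nodup →
      (pvCells n m).length ≤ vis.length + k →
      pvExpand g n m (pvSatB g n m k vis) = pvSatB g n m k vis := by
  intro k
  induction k with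
  | zero =>
    intro vis hsub hnd hlen
    simp only [pvSatB]
    apply pvExpand_len_eq
    have hnd' := pvExpand_nodup g n m vis hnd
    have hsub' := pvExpand_subset g n m vis hsub
    have h1 := (List.subperm_of_subset hnd' (fun x hx => hsub' x hx)).length_le
    obtain ⟨t, ht⟩ := pvExpand_prefix g n m vis
    rw [ht, List.length_append] at h1 ⊢
    omega
  | succ k ih =>
    intro vis hsub hnd hlen
    simp only [pvSatB]
    split_ifs with hl
    · exact pvExpand_len_eq g n m vis hl
    · refine ih _ (pvExpand_subset g n m vis hsub) (pvExpand_nodup g n m vis hnd) ?_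
      obtain ⟨t, ht⟩ := pvExpand_prefix g n m vis
      have hgrow : vis.length < (pvExpand g n m vis).length := by
        cases t with
        | nil => exact absurd (by rw [ht]; simp) hl
        | cons a t =>
          rw [ht, List.length_append]
          simp
      omega

theorem cells_length_le (n m : Int) : (pvCells n m).length ≤ (n * m).toNat := by
  rw [length_pvCells]
  by_cases hn : 0 ≤ n
  · by_cases hm : 0 ≤ m
    · exact le_of_eq (Int.toNat_mul hn hm).symm
    · have hm0 : m.toNat = 0 := by omega
      simp [hm0]
  · have hn0 : n.toNat = 0 := by omega
    simp [hn0]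

theorem pvOutsideB_fix (g : Int → Int → Char) (n m : Int) :
    pvExpand g n m (pvOutsideB g n m) = pvOutsideB g n m := by
  rw [pvOutsideB]
  apply pvSatB_fix
  · exact fun x hx => List.mem_of_mem_filter hx
  · exact (nodup_pvCells n m).filter _
  · have h1 := cells_length_le n m
    omega

theorem pvOutsideB_iff (g : Int → Int → Char) (n m : Int) (x : Int × Int) :
    x ∈ pvOutsideB g n m ↔ pvReach g n m x := by
  constructor
  · intro hx
    rw [pvOutsideB] at hx
    refine pvSatB_sound g n m _ _ ?_ x hx
    intro y hy
    have hc := List.mem_of_mem_filter hy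
    have hp := List.of_mem_filter hy
    simp only [Bool.and_eq_true, decide_eq_true_eq] at hp
    have := pvReach.seed y.1 y.2 (mem_pvCells.mp hc) hp.2 hp.1
    simpa using this
  · intro hr
    induction hr with
    | seed i j h1 h2 h3 =>
      rw [pvOutsideB]
      apply pvSatB_mono
      exact List.mem_filter.mpr ⟨mem_pvCells.mpr h1, by simp [h3, h2]⟩
    | step c i j h1 h2 h3 h4 ih =>
      rw [← pvOutsideB_fix g n m]
      exact (pvExpand_mem g n m _ (i, j)).mpr (Or.inr ⟨c, ih, h2, h3, h4⟩)

-- ---- the per-request transformations agree pointwise ----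

theorem foldl_pvUpd_mem (l : List (Int × Int)) (g : Int → Int → Char) (i j : Int) :
    (l.foldl pvUpd g) i j = if (i, j) ∈ l then '.' else g i j := by
  induction l generalizing g with
  | nil => simp
  | cons c l ih =>
    simp only [List.foldl_cons]
    rw [ih]
    by_cases h : i = c.1 ∧ j = c.2
    · have hx : (i, j) = c := Prod.ext h.1 h.2
      simp [pvUpd, h]
    · have hx : (i, j) ≠ c := by
        intro he; exact h ⟨congrArg Prod.fst he, congrArg Prod.snd he⟩
      simp [pvUpd, h, hx]

theorem craneA_mem (ch : Char) (L : List (Int × Int)) (g : Int → Int → Char) (i j : Int) :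
    (L.foldl (fun g c => if g c.1 c.2 = ch then pvUpd g c else g) g) i j =
      if (i, j) ∈ L ∧ g i j = ch then '.' else g i j := by
  induction L generalizing g with
  | nil => simp
  | cons c L ih =>
    simp only [List.foldl_cons]
    rw [ih]
    by_cases hc : (i, j) = c
    · subst hc
      by_cases hg : g i j = ch
      · have hupd : pvUpd g (i, j) i j = '.' := by simp [pvUpd]
        rw [if_pos hg, hupd,
          if_pos (show (i, j) ∈ (i, j) :: L ∧ g i j = ch from ⟨List.mem_cons_self, hg⟩)]
        split_ifs <;> rfl
      · simp [hg]
    · have hval : (if g c.1 c.2 = ch then pvUpd g c else g) i j = g i j := by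
        split_ifs with h
        · simp only [pvUpd]
          rw [if_neg]
          intro he; exact hc (Prod.ext he.1 he.2)
        · rfl
      rw [hval]
      simp [hc]

theorem toRemoveA_mem (g : Int → Int → Char) (n m : Int) (ch : Char)
    (out : List (Int × Int)) (x : Int × Int) :
    x ∈ pvToRemove g n m ch out ↔ x ∈ pvCells n m ∧ g x.1 x.2 = ch ∧
      (pvBoundary n m x.1 x.2 = true ∨ pvAccessible g out x.1 x.2 = true) := by
  have flat : pvToRemove g n m ch out = (pvCells n m).foldl (fun acc c =>
      if g c.1 c.2 ≠ ch then acc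
      else if c.1 = 0 ∨ c.1 = n - 1 ∨ c.2 = 0 ∨ c.2 = m - 1 then acc ++ [(c.1, c.2)]
      else if pvAccessible g out c.1 c.2 = true then acc ++ [(c.1, c.2)] else acc) [] := by
    rw [pvToRemove, pvCells, List.foldl_flatMap]
    simp only [List.foldl_map]
  have mem : ∀ (L acc : List (Int × Int)), x ∈ L.foldl (fun acc c =>
      if g c.1 c.2 ≠ ch then acc
      else if c.1 = 0 ∨ c.1 = n - 1 ∨ c.2 = 0 ∨ c.2 = m - 1 then acc ++ [(c.1, c.2)]
      else if pvAccessible g out c.1 c.2 = true then acc ++ [(c.1, c.2)] else acc) acc ↔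
      x ∈ acc ∨ (x ∈ L ∧ g x.1 x.2 = ch ∧
        (pvBoundary n m x.1 x.2 = true ∨ pvAccessible g out x.1 x.2 = true)) := by
    intro L
    induction L with
    | nil => intro acc; simp
    | cons c L ih =>
      intro acc
      simp only [List.foldl_cons]
      by_cases h1 : g c.1 c.2 ≠ ch
      · rw [if_pos h1, ih]
        simp only [List.mem_cons]
        constructor
        · rintro (hx | ⟨hxL, hrest⟩)
          · exact Or.inl hx
          · exact Or.inr ⟨Or.inr hxL, hrest⟩
        · rintro (hx | ⟨(rfl | hxL), hrest⟩)
          · exact Or.inl hx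
          · exact absurd hrest.1 h1
          · exact Or.inr ⟨hxL, hrest⟩
      · have hg : g c.1 c.2 = ch := not_not.mp h1
        rw [if_neg h1]
        by_cases h2 : c.1 = 0 ∨ c.1 = n - 1 ∨ c.2 = 0 ∨ c.2 = m - 1
        · rw [if_pos h2, ih]
          simp only [List.mem_append, List.mem_cons, List.not_mem_nil, or_false, Prod.mk.eta]
          constructor
          · rintro ((hx | rfl) | ⟨hxL, hrest⟩)
            · exact Or.inl hx
            · exact Or.inr ⟨Or.inl rfl, hg, Or.inl (pvBoundary_iff.mpr h2)⟩
            · exact Or.inr ⟨Or.inr hxL, hrest⟩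
          · rintro (hx | ⟨(rfl | hxL), hrest⟩)
            · exact Or.inl (Or.inl hx)
            · exact Or.inl (Or.inr rfl)
            · exact Or.inr ⟨hxL, hrest⟩
        · rw [if_neg h2]
          by_cases h3 : pvAccessible g out c.1 c.2 = true
          · rw [if_pos h3, ih]
            simp only [List.mem_append, List.mem_cons, List.not_mem_nil, or_false, Prod.mk.eta]
            constructor
            · rintro ((hx | rfl) | ⟨hxL, hrest⟩)
              · exact Or.inl hx
              · exact Or.inr ⟨Or.inl rfl, hg, Or.inr h3⟩
              · exact Or.inr ⟨Or.inr hxL, hrest⟩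
            · rintro (hx | ⟨(rfl | hxL), hrest⟩)
              · exact Or.inl (Or.inl hx)
              · exact Or.inl (Or.inr rfl)
              · exact Or.inr ⟨hxL, hrest⟩
          · rw [if_neg h3, ih]
            simp only [List.mem_cons]
            constructor
            · rintro (hx | ⟨hxL, hrest⟩)
              · exact Or.inl hx
              · exact Or.inr ⟨Or.inr hxL, hrest⟩
            · rintro (hx | ⟨(rfl | hxL), hrest⟩)
              · exact Or.inl hx
              · rcases hrest.2 with hb | ha
                · exact absurd (pvBoundary_iff.mp hb) h2
                · exact absurd ha h3
              · exact Or.inr ⟨hxL, hrest⟩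
  rw [flat, mem]
  simp

theorem pvStepFn_geq (n m : Int) (g g' : Int → Int → Char) (req : String)
    (hgeq : pvGEq n m g g') (hfork : req.toList.length ≠ 2 → 1 ≤ n ∧ 1 ≤ m) :
    pvGEq n m (pvStepFnA n m g req) (pvStepFnB n m g' req) := by
  intro i j hin
  have hmem : (i, j) ∈ pvCells n m := mem_pvCells.mpr hin
  have hg := hgeq i j hin
  by_cases hl : req.toList.length = 2
  · simp only [pvStepFnA, pvStepFnB, if_pos hl]
    have flat : (PySem.List.pyRange 0 n 1).foldl (fun g i =>
        (PySem.List.pyRange 0 m 1).foldl (fun g j =>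
          if g i j = req.toList.headD '?' then pvUpd g (i, j) else g) g) g =
        (pvCells n m).foldl
          (fun g c => if g c.1 c.2 = req.toList.headD '?' then pvUpd g c else g) g := by
      rw [pvCells, List.foldl_flatMap]
      simp only [List.foldl_map]
    rw [flat, craneA_mem]
    by_cases hch : g i j = req.toList.headD '?'
    · rw [if_pos ⟨hmem, hch⟩, if_pos (hg ▸ hch)]
    · rw [if_neg (fun hc => hch hc.2), if_neg (hg ▸ hch), hg]
  · obtain ⟨hn1, hm1⟩ := hfork hl
    simp only [pvStepFnA, pvStepFnB, if_neg hl]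
    rw [foldl_pvUpd_mem, foldl_pvUpd_mem]
    have hiff : ((i, j) ∈ pvToRemove g n m (req.toList.headD '?') (pvOutsideA g n m)) ↔
        ((i, j) ∈ (pvCells n m).filter (fun c =>
          decide (g' c.1 c.2 = req.toList.headD '?') &&
            (pvBoundary n m c.1 c.2 || (pvNbrs c).any (fun p =>
              (pvOutsideB g' n m).contains p)))) := by
      rw [toRemoveA_mem, List.mem_filter]
      simp only [Bool.and_eq_true, Bool.or_eq_true, decide_eq_true_eq, List.any_eq_true]
      constructor
      · rintro ⟨hc, hch, hacc⟩
        refine ⟨hc, by rw [← hg]; exact hch, ?_⟩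
        rcases hacc with hb | ha
        · exact Or.inl hb
        · right
          have ha' : ∃ d ∈ pvDirsA, g (i + d.1) (j + d.2) = '.' ∧
              (i + d.1, j + d.2) ∈ pvOutsideA g n m := by
            simpa [pvAccessible, List.any_eq_true, Bool.and_eq_true,
              decide_eq_true_eq] using ha
          obtain ⟨d, hd, hdot, hout⟩ := ha'
          refine ⟨(i + d.1, j + d.2), mem_pvNbrs.mpr ⟨d, hd, rfl⟩, ?_⟩
          have hr : pvReach g n m (i + d.1, j + d.2) :=
            (pvOutsideA_iff g n m hn1 hm1 _).mp hout
          have hr' := pvReach_congr hgeq hr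
          simpa using (pvOutsideB_iff g' n m _).mpr hr'
      · rintro ⟨hc, hch, hrest⟩
        refine ⟨hc, by rw [hg]; exact hch, ?_⟩
        rcases hrest with hb | ⟨p, hp, hcont⟩
        · exact Or.inl hb
        · right
          have hr' : pvReach g' n m p := (pvOutsideB_iff g' n m p).mp (by simpa using hcont)
          have hr : pvReach g n m p :=
            pvReach_congr (fun a b hab => (hgeq a b hab).symm) hr'
          rcases mem_pvNbrs.mp hp with ⟨d, hd, rfl⟩
          have hdot := (pvReach_inR hr).2
          have hout := (pvOutsideA_iff g n m hn1 hm1 _).mpr hr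
          simp only [pvAccessible, List.any_eq_true, Bool.and_eq_true, decide_eq_true_eq]
          exact ⟨d, hd, by simpa using hdot, by simpa using hout⟩
    by_cases hrm : (i, j) ∈ pvToRemove g n m (req.toList.headD '?') (pvOutsideA g n m)
    · rw [if_pos hrm, if_pos (hiff.mp hrm)]
    · rw [if_neg hrm, if_neg (fun hc => hrm (hiff.mpr hc)), hg]

theorem pvGEq_symm {n m : Int} {g g' : Int → Int → Char} (h : pvGEq n m g g') :
    pvGEq n m g' g := fun i j hin => (h i j hin).symm

theorem pvGEq_trans {n m : Int} {a b c : Int → Int → Char} (h1 : pvGEq n m a b)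
    (h2 : pvGEq n m b c) : pvGEq n m a c := fun i j hin => (h1 i j hin).trans (h2 i j hin)

theorem pvLookTab_geq (n m : Int) (g : Int → Int → Char) :
    pvGEq n m (pvLook (pvTab n m g)) g := by
  intro i j hin
  rw [pvInR_iff] at hin
  obtain ⟨h0i, hiN, h0j, hjM⟩ := hin
  simp only [pvLook, pvTab]
  have hi : i.toNat < ((PySem.List.pyRange 0 n 1).map
      (fun i => (PySem.List.pyRange 0 m 1).map (fun j => g i j))).length := by
    simp only [List.length_map, PySem.List.length_pyRange_one]
    omega
  rw [List.getD_eq_getElem _ _ hi]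
  simp only [List.getElem_map, PySem.List.getElem_pyRange_one, zero_add]
  rw [Int.toNat_of_nonneg h0i]
  have hj2 : j.toNat < ((PySem.List.pyRange 0 m 1).map (fun j => g i j)).length := by
    simp only [List.length_map, PySem.List.length_pyRange_one]
    omega
  rw [List.getD_eq_getElem _ _ hj2]
  simp only [List.getElem_map, PySem.List.getElem_pyRange_one, zero_add]
  rw [Int.toNat_of_nonneg h0j]

theorem pvSteps_geq (n m : Int) (reqs : List String) (rA rB : List (List Char))
    (hgeq : pvGEq n m (pvLook rA) (pvLook rB))
    (hfork : ∀ req ∈ reqs, req.toList.length ≠ 2 → 1 ≤ n ∧ 1 ≤ m) :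
    pvGEq n m (pvLook (reqs.foldl (pvStepA n m) rA)) (pvLook (reqs.foldl (pvStepB n m) rB)) := by
  induction reqs generalizing rA rB with
  | nil => exact hgeq
  | cons r reqs ih =>
    refine ih _ _ ?_ (fun req hreq => hfork req (by simp [hreq]))
    unfold pvStepA pvStepB
    exact pvGEq_trans (pvLookTab_geq n m _)
      (pvGEq_trans (pvStepFn_geq n m _ _ r hgeq (hfork r (by simp)))
        (pvGEq_symm (pvLookTab_geq n m _)))

theorem pvGrid_geq (storage : List String) (hne : storage ≠ [])
    (hrow : ∀ r ∈ storage, ((storage.headD "").toList).length ≤ r.toList.length) :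
    pvGEq (storage.length) (((storage.headD "").toList).length)
      (pvGridA storage) (pvGridB storage (((storage.headD "").toList).length)) := by
  intro i j hin
  rw [pvInR_iff] at hin
  obtain ⟨h0i, hiN, h0j, hjM⟩ := hin
  have hi : i.toNat < storage.length := by omega
  have hj : j.toNat < ((storage.headD "").toList).length := by omega
  unfold pvGridA pvGridB
  have hi' : i.toNat < (storage.map String.toList).length := by simpa using hi
  have hi'' : i.toNat <
      (storage.map (fun r => r.toList.take ((((storage.headD "").toList).length : Int)).toNat)).length := by
    simpa using hi
  rw [List.getD_eq_getElem _ _ hi', List.getD_eq_getElem _ _ hi'']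
  simp only [List.getElem_map]
  have hmem : storage[i.toNat] ∈ storage := List.getElem_mem _
  have hlen : ((storage.headD "").toList).length ≤ (storage[i.toNat]).toList.length :=
    hrow _ hmem
  have htn : ((((storage.headD "").toList).length : Int)).toNat =
      ((storage.headD "").toList).length := Int.toNat_natCast _
  have hjK : j.toNat < ((((storage.headD "").toList).length : Int)).toNat := by omega
  rw [List.getD_eq_getElem?_getD, List.getD_eq_getElem?_getD,
    List.getElem?_take_of_lt hjK]

theorem pvCountA_eq (g : Int → Int → Char) (n m : Int) :
    (PySem.List.pyRange 0 n 1).foldl (fun acc i =>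
      (PySem.List.pyRange 0 m 1).foldl (fun acc j =>
        if g i j ≠ '.' then acc + 1 else acc) acc) (0 : Int) =
    ((pvCells n m).countP (fun c => decide (g c.1 c.2 ≠ '.')) : Int) := by
  have flat : (PySem.List.pyRange 0 n 1).foldl (fun acc i =>
      (PySem.List.pyRange 0 m 1).foldl (fun acc j =>
        if g i j ≠ '.' then acc + 1 else acc) acc) (0 : Int) =
      (pvCells n m).foldl (fun acc c => if g c.1 c.2 ≠ '.' then acc + 1 else acc) 0 := by
    rw [pvCells, List.foldl_flatMap]
    simp only [List.foldl_map]
  rw [flat]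
  have h := PySem.List.foldl_count_if (fun c : Int × Int => decide (g c.1 c.2 ≠ '.'))
    (pvCells n m) 0
  simpa using h

-- ===== VERDICT (by name: the statement is the Claim_ definition above) =====
theorem solution_spec : Claim_equal_solution := by
  intro storage requests _hdom hpre
  obtain ⟨hne, hrow, hlen, hm0⟩ := hpre
  unfold Spec_solution solution solution_alt
  set n : Int := (storage.length : Int) with hn
  set m : Int := (((storage.headD "").toList).length : Int) with hmdef
  have hn1 : 1 ≤ n := by
    have h0 : storage.length ≠ 0 := fun h => hne (List.length_eq_zero_iff.mp h)
    simp only [hn]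
    omega
  have hfork : ∀ req ∈ requests, req.toList.length ≠ 2 → 1 ≤ n ∧ 1 ≤ m := by
    intro req hreq hlen2
    refine ⟨hn1, ?_⟩
    by_contra h
    have hm' : ((storage.headD "").toList).length = 0 := by
      have h2 : ¬ (1 : Int) ≤ ((((storage.headD "").toList).length : Nat) : Int) := hmdef ▸ h
      have h3 : ¬ 1 ≤ (((storage.headD "").toList).length : Nat) := by exact_mod_cast h2
      omega
    exact hlen2 (hm0 hm' req hreq)
  have hgeq := pvSteps_geq n m requests _ _
    (pvGEq_trans (pvLookTab_geq n m _)
      (pvGEq_trans (pvGrid_geq storage hne hrow) (pvGEq_symm (pvLookTab_geq n m _)))) hfork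
  rw [pvCountA_eq]
  congr 1
  apply List.countP_congr
  intro c hc
  have hg := hgeq c.1 c.2 (mem_pvCells.mp hc)
  rw [← hmdef] at hg
  rw [hg]
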